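-- pv_equiv track=rewrite | github.com/Nikolay-Yakushev/Sitemap-generator | sitemap.py | traverse_breadth
-- ===== SOURCE A (Python) =====
-- def traverse_breadth(structure, start_point):
--     # yield main url of a structure
--     yield start_point
--     # structure[start] = ['https://scrapethissite.com/pages/', 'https://scrapethissite.com/lessons/',...]
--     page_nodes = structure[start_point]
--     while len(page_nodes) > 0:
--         # pages we will get after parsing structure[start]
--         next_pages = []
--         for page in page_nodes:
--             yield page
--             next_pages.extend(structure.get(page, []))
--         page_nodes = next_pages
-- ===== SOURCE B (Python) =====
-- def traverse_breadth(structure, start_point):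
--     # Flat single-queue BFS (arena queue with a read pointer) instead of
--     # level-synchronized nested loops; FIFO order gives the same emission order.
--     yield start_point
--     queue = list(structure[start_point])
--     i = 0
--     while i < len(queue):
--         node = queue[i]
--         i += 1
--         yield node
--         queue.extend(structure.get(node, []))
-- ===== Notes on version B (the rewrite author's own statement) =====
-- stated objective: alternative
-- what changed: Replaces the level-synchronized BFS (nested while/for over per-level lists) by a single flat loop over one growing arena queue with a read pointer; FIFO order reproduces the exact emission order.
import Mathlib
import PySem

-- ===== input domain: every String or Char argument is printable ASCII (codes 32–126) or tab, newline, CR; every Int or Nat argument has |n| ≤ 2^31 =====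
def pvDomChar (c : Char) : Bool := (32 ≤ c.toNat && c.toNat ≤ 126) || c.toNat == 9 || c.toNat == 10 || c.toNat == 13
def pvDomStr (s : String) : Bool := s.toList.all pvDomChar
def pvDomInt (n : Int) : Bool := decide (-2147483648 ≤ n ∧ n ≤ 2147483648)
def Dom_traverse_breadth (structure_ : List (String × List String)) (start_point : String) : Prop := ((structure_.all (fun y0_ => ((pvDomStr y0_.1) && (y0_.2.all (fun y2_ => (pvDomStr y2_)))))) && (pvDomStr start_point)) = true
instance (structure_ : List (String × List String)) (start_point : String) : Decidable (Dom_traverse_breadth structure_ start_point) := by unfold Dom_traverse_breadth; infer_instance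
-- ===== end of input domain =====

-- B replaces A's level-synchronized BFS (nested while/for over per-level lists) by one flat
-- loop over a single growing queue with a read pointer; same emitted sequence (return value of
-- list(generator)); no side effects in either. Both Pythons diverge on a structure whose
-- reachable part has a cycle; the ports carry pvFuel, a fuel bound counted per emitted node,
-- purely as a totality guard — it exceeds the emission count of every terminating Python run.

-- structure.get(page, []) / structure[page]: first-match lookup in the association list
def pvGetD (st : List (String × List String)) (k : String) : List String :=
  PySem.Dict.getD (PySem.Dict.mk st) k []

-- totality fuel: with S = 1 + Σ (1 + |succs|) and K = #keys, every terminating BFS emits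
-- at most (K+1)·S^(K+1) ≤ S^(K+2) nodes
def pvFuel (st : List (String × List String)) : Nat :=
  (st.foldl (fun a p => a + p.2.length + 1) 1) ^ (st.length + 2)

-- ===== PORT A =====
-- A's while/for loops: cur = rest of the current level (the for), nxt = the next_pages accumulator;
-- when cur empties the while re-enters with (nxt, []); fuel decrements once per step (totality guard)
def pvRunA (st : List (String × List String)) (fuel : Nat) (cur nxt : List String) : List String :=
  match fuel with
  | 0 => []
  | f + 1 =>
    match cur with
    | p :: ps => p :: pvRunA st f ps (nxt ++ pvGetD st p)
    | [] =>
      match nxt with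
      | [] => []
      | q :: qs => q :: pvRunA st f qs (pvGetD st q)

def traverse_breadth (structure_ : List (String × List String)) (start_point : String) : List String :=
  start_point :: pvRunA structure_ (pvFuel structure_) (pvGetD structure_ start_point) []

-- ===== PORT B =====
-- B's single loop: queue grows by extend, i is the read pointer
def pvRunB (st : List (String × List String)) (fuel : Nat) (queue : List String) (i : Nat) : List String :=
  match fuel with
  | 0 => []
  | f + 1 =>
    if h : i < queue.length then
      queue[i] :: pvRunB st f (queue ++ pvGetD st queue[i]) (i + 1)
    else []

def traverse_breadth_alt (structure_ : List (String × List String)) (start_point : String) : List String :=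
  start_point :: pvRunB structure_ (pvFuel structure_) (pvGetD structure_ start_point) 0

-- ===== PRECONDITION & SPEC =====
-- Pre_ excludes exactly the inputs where start_point is not a key: there Python A raises KeyError.
def Pre_traverse_breadth (structure_ : List (String × List String)) (start_point : String) : Prop :=
  (structure_.map Prod.fst).contains start_point = true
instance (structure_ : List (String × List String)) (start_point : String) : Decidable (Pre_traverse_breadth structure_ start_point) := by unfold Pre_traverse_breadth; infer_instance

def pvWitness_traverse_breadth : (List (String × List String)) × String :=
  ([("a", ["b", "c"]), ("b", ["c"])], "a")

def Spec_traverse_breadth (structure_ : List (String × List String)) (start_point : String) (out : List String) : Prop := out = traverse_breadth_alt structure_ start_point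
instance (structure_ : List (String × List String)) (start_point : String) (out : List String) : Decidable (Spec_traverse_breadth structure_ start_point out) := by unfold Spec_traverse_breadth; infer_instance

-- ===== CLAIM (what is proved, stated in full; the proofs are below) =====
def Claim_equal_traverse_breadth : Prop := ∀ (structure_ : List (String × List String)) (start_point : String), Dom_traverse_breadth structure_ start_point → Pre_traverse_breadth structure_ start_point → Spec_traverse_breadth structure_ start_point (traverse_breadth structure_ start_point)

-- ===== LEMMAS AND PROOFS =====

-- proof-only reference shape: the one-at-a-time queue, recursion on fuel alone
def pvQ (st : List (String × List String)) (fuel : Nat) (q : List String) : List String :=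
  match fuel, q with
  | 0, _ => []
  | _ + 1, [] => []
  | f + 1, p :: ps => p :: pvQ st f (ps ++ pvGetD st p)

lemma pvQ_nil (st : List (String × List String)) (fuel : Nat) : pvQ st fuel [] = [] := by
  cases fuel <;> simp [pvQ]

-- A's two-list level traversal is the one-at-a-time traversal of cur ++ nxt
lemma pvRunA_eq_pvQ (st : List (String × List String)) (fuel : Nat) :
    ∀ cur nxt : List String, pvRunA st fuel cur nxt = pvQ st fuel (cur ++ nxt) := by
  induction fuel with
  | zero => intro cur nxt; simp [pvRunA, pvQ]
  | succ f ih =>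
    intro cur nxt
    cases cur with
    | cons p ps => simp [pvRunA, pvQ, ih]
    | nil =>
      cases nxt with
      | nil => simp [pvRunA, pvQ]
      | cons q qs => simp [pvRunA, pvQ, ih]

-- B's arena queue with read pointer i is the one-at-a-time traversal of queue.drop i
lemma pvRunB_eq_pvQ (st : List (String × List String)) (fuel : Nat) :
    ∀ (q : List String) (i : Nat), i ≤ q.length → pvRunB st fuel q i = pvQ st fuel (q.drop i) := by
  induction fuel with
  | zero => intro q i _; simp [pvRunB, pvQ]
  | succ f ih =>
    intro q i hle
    rw [pvRunB]
    by_cases h : i < q.length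
    · rw [List.drop_eq_getElem_cons h]
      simp only [h, dif_pos, pvQ]
      rw [ih (q ++ pvGetD st q[i]) (i + 1) (by simp; omega),
          List.drop_append_of_le_length (by omega)]
    · have : i = q.length := by omega
      simp [this, pvQ_nil]

-- ===== VERDICT (by name: the statement is the Claim_ definition above) =====
theorem traverse_breadth_spec : Claim_equal_traverse_breadth := by
  intro structure_ start_point _ _
  unfold Spec_traverse_breadth traverse_breadth traverse_breadth_alt
  rw [pvRunA_eq_pvQ _ _ _ _, pvRunB_eq_pvQ structure_ _ _ 0 (by simp), List.drop_zero, List.append_nil]
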